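-- pv_equiv track=rewrite | github.com/hypergraphman/EGE24_11class | task5/cc_other_6.py | f
-- ===== SOURCE A (Python) =====
-- def n_to_p(n, p):
--     a = []
--     while n:
--         a.insert(0, n % p)
--         n //= p
--     return a
--
-- def dop(num):
--     s0, s1 = 0, 0
--     for el in num:
--         if el % 2:
--             s1 += el
--         else:
--             s0 += el
--     s = max(s1, s0)
--     num.append(s % 80)
--
-- def f(n):
--     num = n_to_p(n, 80)
--     dop(num)
--     dop(num)
--     res = 0
--     k = 0
--     for el in num[::-1]:
--         res += el * 80**k
--         k += 1
--     return res
-- ===== SOURCE B (Python) =====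
-- def f(n):
--     s0 = s1 = 0
--     m = n
--     while m:
--         d = m % 80
--         if d % 2:
--             s1 += d
--         else:
--             s0 += d
--         m //= 80
--     d1 = max(s1, s0) % 80
--     if d1 % 2:
--         s1 += d1
--     else:
--         s0 += d1
--     d2 = max(s1, s0) % 80
--     return n * 6400 + d1 * 80 + d2
-- ===== Notes on version B (the rewrite author's own statement) =====
-- stated objective: simpler
-- what changed: B replaces the digit list, the two list-rebuilding dop passes and the 80**k reconstruction loop by one digit-peeling loop that keeps only the two parity sums, then returns the closed form n*6400 + d1*80 + d2.
import Mathlib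
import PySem

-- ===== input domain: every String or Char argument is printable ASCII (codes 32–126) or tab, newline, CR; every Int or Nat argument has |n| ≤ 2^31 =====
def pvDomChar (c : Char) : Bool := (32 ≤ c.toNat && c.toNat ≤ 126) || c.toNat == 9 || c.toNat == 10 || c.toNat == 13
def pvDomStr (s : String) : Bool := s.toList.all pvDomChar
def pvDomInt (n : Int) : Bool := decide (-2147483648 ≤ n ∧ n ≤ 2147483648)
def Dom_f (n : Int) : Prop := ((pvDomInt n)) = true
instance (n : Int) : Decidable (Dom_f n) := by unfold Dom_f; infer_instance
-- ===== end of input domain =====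

-- B keeps only the two parity sums in one digit-peeling loop and returns the closed form
-- n*6400 + d1*80 + d2, instead of building a digit list, appending two checksum digits and
-- reconstructing with an 80**k loop (objective: simpler).


-- ===== PORT A =====
-- termination measure for the 'while n' loops (both ports); cited in decreasing_by
theorem pvFloordiv80_toNat_lt (n : Int) (h : 0 < n) :
    (PySem.Int.floordiv n 80).toNat < n.toNat := by
  rw [PySem.Int.floordiv_eq_ediv_of_pos (by omega)]
  omega

-- while n: a.insert(0, n % p); n //= p   — guard '0 < n' totalizes: Python diverges for n < 0
-- (excluded by Pre_f) and 'while n' stops exactly at n = 0 for n ≥ 0.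
def f_nToP (n : Int) (a : List Int) : List Int :=
  if h : 0 < n then f_nToP (PySem.Int.floordiv n 80) (PySem.Int.mod n 80 :: a) else a
termination_by n.toNat
decreasing_by exact pvFloordiv80_toNat_lt n h

-- dop: fold the parity sums over num, append max % 80 (returns the new list; Python mutates)
def f_dop (num : List Int) : List Int :=
  let s := num.foldl
    (fun (p : Int × Int) el =>
      if PySem.Int.mod el 2 ≠ 0 then (p.1, p.2 + el) else (p.1 + el, p.2)) (0, 0)
  num ++ [PySem.Int.mod (max s.2 s.1) 80]

def f (n : Int) : Int :=
  let num := f_dop (f_dop (f_nToP n []))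
  -- for el in num[::-1]: res += el * 80**k; k += 1   (num[::-1] is List.reverse)
  (num.reverse.foldl (fun (p : Int × Nat) el => (p.1 + el * (80 : Int) ^ p.2, p.2 + 1)) (0, 0)).1

-- ===== PORT B =====
-- while m: d = m % 80; add d to s1/s0 by parity; m //= 80   (same totalizing guard as port A)
def f_altLoop (m : Int) (s0 s1 : Int) : Int × Int :=
  if h : 0 < m then
    let d := PySem.Int.mod m 80
    if PySem.Int.mod d 2 ≠ 0 then f_altLoop (PySem.Int.floordiv m 80) s0 (s1 + d)
    else f_altLoop (PySem.Int.floordiv m 80) (s0 + d) s1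
  else (s0, s1)
termination_by m.toNat
decreasing_by all_goals exact pvFloordiv80_toNat_lt m h

def f_alt (n : Int) : Int :=
  let p := f_altLoop n 0 0
  let d1 := PySem.Int.mod (max p.2 p.1) 80
  let p2 := if PySem.Int.mod d1 2 ≠ 0 then (p.1, p.2 + d1) else (p.1 + d1, p.2)
  let d2 := PySem.Int.mod (max p2.2 p2.1) 80
  n * 6400 + d1 * 80 + d2

-- ===== PRECONDITION & SPEC =====
-- Pre_f excludes n < 0, on which Python's 'while n' with n //= 80 never terminates (n //= 80
-- stays at -1): A returns no value there.
def Pre_f (n : Int) : Prop := 0 ≤ n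
instance (n : Int) : Decidable (Pre_f n) := by unfold Pre_f; infer_instance
def pvWitness_f : Int := 12345

def Spec_f (n : Int) (out : Int) : Prop := out = f_alt n
instance (n : Int) (out : Int) : Decidable (Spec_f n out) := by unfold Spec_f; infer_instance

-- ===== CLAIM (what is proved, stated in full; the proofs are below) =====
def Claim_equal_f : Prop := ∀ (n : Int), Dom_f n → Pre_f n → Spec_f n (f n)

-- ===== LEMMAS AND PROOFS =====

-- sum of the odd digits (Python truthiness: el % 2 ≠ 0) resp. even digits of a list
def sumO (l : List Int) : Int := (l.map (fun d => if PySem.Int.mod d 2 ≠ 0 then d else 0)).sum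
def sumE (l : List Int) : Int := (l.map (fun d => if PySem.Int.mod d 2 ≠ 0 then 0 else d)).sum

theorem sumO_append (l₁ l₂ : List Int) : sumO (l₁ ++ l₂) = sumO l₁ + sumO l₂ := by
  simp [sumO]
theorem sumE_append (l₁ l₂ : List Int) : sumE (l₁ ++ l₂) = sumE l₁ + sumE l₂ := by
  simp [sumE]

theorem sumO_cons (x : Int) (t : List Int) :
    sumO (x :: t) = (if PySem.Int.mod x 2 ≠ 0 then x else 0) + sumO t := by
  simp only [sumO, List.map_cons, List.sum_cons]
theorem sumE_cons (x : Int) (t : List Int) :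
    sumE (x :: t) = (if PySem.Int.mod x 2 ≠ 0 then 0 else x) + sumE t := by
  simp only [sumE, List.map_cons, List.sum_cons]
theorem sumO_singleton (x : Int) : sumO [x] = if PySem.Int.mod x 2 ≠ 0 then x else 0 := by
  simp only [sumO, List.map_cons, List.map_nil, List.sum_cons, List.sum_nil, add_zero]
theorem sumE_singleton (x : Int) : sumE [x] = if PySem.Int.mod x 2 ≠ 0 then 0 else x := by
  simp only [sumE, List.map_cons, List.map_nil, List.sum_cons, List.sum_nil, add_zero]

-- equation lemmas for the while-loop recursions
theorem f_nToP_step (n : Int) (a : List Int) (h : 0 < n) :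
    f_nToP n a = f_nToP (PySem.Int.floordiv n 80) (PySem.Int.mod n 80 :: a) := by
  rw [f_nToP]; simp [h]

theorem f_nToP_stop (n : Int) (a : List Int) (h : ¬ 0 < n) : f_nToP n a = a := by
  rw [f_nToP]; simp [h]

-- the accumulator of f_nToP factors out
theorem f_nToP_append (n : Int) (a : List Int) : f_nToP n a = f_nToP n [] ++ a := by
  generalize hk : n.toNat = k
  induction k using Nat.strong_induction_on generalizing n a with
  | _ k ih =>
    by_cases h : 0 < n
    · subst hk
      rw [f_nToP_step n a h, f_nToP_step n [] h,
          ih _ (pvFloordiv80_toNat_lt n h) _ _ rfl,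
          ih _ (pvFloordiv80_toNat_lt n h) _ [PySem.Int.mod n 80] rfl,
          List.append_assoc]
      rfl
    · rw [f_nToP_stop n a h, f_nToP_stop n [] h]; rfl

-- msd-first digit list: peeling the last digit
theorem f_nToP_pos (n : Int) (h : 0 < n) :
    f_nToP n [] = f_nToP (PySem.Int.floordiv n 80) [] ++ [PySem.Int.mod n 80] := by
  rw [f_nToP_step n [] h]
  exact f_nToP_append _ _

-- base-80 value, msd-first
def val80 (l : List Int) : Int := l.foldl (fun acc d => acc * 80 + d) 0

theorem val80_append_singleton (l : List Int) (d : Int) :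
    val80 (l ++ [d]) = val80 l * 80 + d := by
  simp [val80, List.foldl_append]

theorem val80_f_nToP (n : Int) (h : 0 ≤ n) : val80 (f_nToP n []) = n := by
  generalize hk : n.toNat = k
  induction k using Nat.strong_induction_on generalizing n with
  | _ k ih =>
    by_cases hp : 0 < n
    · subst hk
      rw [f_nToP_pos n hp, val80_append_singleton,
        ih _ (pvFloordiv80_toNat_lt n hp) _
          (by rw [PySem.Int.floordiv_eq_ediv_of_pos (by omega)]; omega) rfl]
      rw [PySem.Int.floordiv_eq_ediv_of_pos (by omega), PySem.Int.mod_eq_emod_of_pos (by omega)]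
      omega
    · rw [f_nToP_stop n [] hp]; simp [val80]; omega

-- the dop fold computes (sumE, sumO) on top of its initial state
theorem dop_fold (l : List Int) (s0 s1 : Int) :
    l.foldl (fun (p : Int × Int) el =>
        if PySem.Int.mod el 2 ≠ 0 then (p.1, p.2 + el) else (p.1 + el, p.2)) (s0, s1)
      = (s0 + sumE l, s1 + sumO l) := by
  induction l generalizing s0 s1 with
  | nil => simp [sumE, sumO]
  | cons d t ih =>
      simp only [List.foldl_cons]
      by_cases hd : PySem.Int.mod d 2 ≠ 0
      · rw [if_pos hd, ih, sumE_cons, sumO_cons, if_pos hd, if_pos hd]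
        simp only [Prod.mk.injEq]; constructor <;> ring
      · rw [if_neg hd, ih, sumE_cons, sumO_cons, if_neg hd, if_neg hd]
        simp only [Prod.mk.injEq]; constructor <;> ring

-- B's loop computes the same parity sums as the dop fold over A's digit list
theorem f_altLoop_eq (m : Int) (s0 s1 : Int) :
    f_altLoop m s0 s1 = (s0 + sumE (f_nToP m []), s1 + sumO (f_nToP m [])) := by
  generalize hk : m.toNat = k
  induction k using Nat.strong_induction_on generalizing m s0 s1 with
  | _ k ih =>
    by_cases h : 0 < m
    · subst hk
      rw [f_altLoop]
      simp only [h, dif_pos]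
      rw [f_nToP_pos m h, sumE_append, sumO_append]
      rw [sumE_singleton, sumO_singleton]
      by_cases hd : PySem.Int.mod (PySem.Int.mod m 80) 2 ≠ 0
      · rw [if_pos hd, ih _ (pvFloordiv80_toNat_lt m h) _ _ _ rfl, if_pos hd, if_pos hd]
        simp only [Prod.mk.injEq]; constructor <;> ring
      · rw [if_neg hd, ih _ (pvFloordiv80_toNat_lt m h) _ _ _ rfl, if_neg hd, if_neg hd]
        simp only [Prod.mk.injEq]; constructor <;> ring
    · rw [f_altLoop, f_nToP_stop m [] h]; simp [h, sumE, sumO]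

-- the 80**k reconstruction fold over the reversed list is the msd-first value
theorem res_fold (l : List Int) (res : Int) (k : Nat) :
    (l.foldl (fun (p : Int × Nat) el => (p.1 + el * (80 : Int) ^ p.2, p.2 + 1)) (res, k))
      = (res + val80 l.reverse * 80 ^ k, k + l.length) := by
  induction l generalizing res k with
  | nil => simp [val80]
  | cons d t ih =>
      simp only [List.foldl_cons, List.reverse_cons]
      rw [ih, val80_append_singleton]
      simp only [Prod.mk.injEq, List.length_cons]
      constructor
      · ring
      · omega

theorem res_fold_reverse (l : List Int) :
    (l.reverse.foldl (fun (p : Int × Nat) el => (p.1 + el * (80 : Int) ^ p.2, p.2 + 1)) (0, 0)).1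
      = val80 l := by
  rw [res_fold]; simp

-- ===== VERDICT (by name: the statement is the Claim_ definition above) =====
theorem f_spec : Claim_equal_f := by
  intro n _ hn
  unfold Spec_f
  simp only [f, f_alt, f_dop]
  rw [f_altLoop_eq, res_fold_reverse, dop_fold, dop_fold,
      sumE_append, sumO_append, sumE_singleton, sumO_singleton,
      val80_append_singleton, val80_append_singleton, val80_f_nToP n hn]
  split_ifs with h1 <;> simp only [add_zero] <;> ring_nf
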